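-- pv_equiv track=rewrite | github.com/Horcon72/german-audiobook-pipeline | tts/audiobook.py | token_aware_batches
-- ===== SOURCE A (Python) =====
-- def token_aware_batches(
--     sentences: list[str],
--     token_counts: list[int],
--     token_budget: int = 800,
-- ) -> list[list[str]]:
--     """
--     Partition *sentences* into contiguous batches such that for every batch:
--
--         max(token_counts_in_batch) × len(batch) ≤ token_budget
--
--     This minimises padding waste while maximising sentences per batch call:
--     - Short sentences → large batches (low max-token → many fit in budget)
--     - Long sentences → smaller batches (high max-token → fewer fit)
--
--     TOKEN_BUDGET = 800 corresponds roughly to batch=12 at the median sentence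
--     length (~49 tokens) and batch=11 at the longest sentences (72 tokens),
--     keeping VRAM below ~8 GB on a 16 GB card.
--     """
--     groups: list[list[str]] = []
--     current: list[str] = []
--     current_max = 0
--
--     for sent, n_tok in zip(sentences, token_counts):
--         new_max = max(current_max, n_tok)
--         if current and new_max * (len(current) + 1) > token_budget:
--             groups.append(current)
--             current = []
--             current_max = 0
--             new_max = n_tok
--         current.append(sent)
--         current_max = new_max
--
--     if current:
--         groups.append(current)
--     return groups
-- ===== SOURCE B (Python) =====
-- def token_aware_batches(
--     sentences: list[str],
--     token_counts: list[int],
--     token_budget: int = 800,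
-- ) -> list[list[str]]:
--     # Staged decomposition: pass 1 derives the batch SIZES from token_counts alone
--     # (sentences are never consulted while deciding); pass 2 turns the sizes into
--     # cumulative boundaries and carves sentences into those slices.
--     n = min(len(sentences), len(token_counts))
--
--     # pass 1: batch sizes from the token counts only
--     sizes = []
--     i = 0
--     while i < n:
--         pm = token_counts[i]            # prefix maximum of the tentative batch
--         j = i + 1
--         while j < n and max(pm, token_counts[j]) * (j - i + 1) <= token_budget:
--             pm = max(pm, token_counts[j])
--             j += 1
--         sizes.append(j - i)
--         i = j
--
--     # pass 2: cumulative boundaries, then slice the sentence list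
--     bounds = [0]
--     for L in sizes:
--         bounds.append(bounds[-1] + L)
--     return [sentences[a:b] for a, b in zip(bounds, bounds[1:])]
-- ===== Notes on version B (the rewrite author's own statement) =====
-- stated objective: alternative
-- what changed: Replaces A's single-pass state machine (which builds the batch contents while scanning, carrying the running batch, its running max and a flush-on-overflow plus final flush) by two staged passes: pass 1 computes only the list of batch sizes from token_counts (sentences are never consulted while deciding), pass 2 converts the sizes into cumulative boundaries and materialises the batches by slicing the sentence list.
-- outside the precondition, e.g. on token_aware_batches(['a', 'b'], [-10, -10], -5): A returns [['a'], ['b']], B returns [['a', 'b']]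
import Mathlib
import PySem

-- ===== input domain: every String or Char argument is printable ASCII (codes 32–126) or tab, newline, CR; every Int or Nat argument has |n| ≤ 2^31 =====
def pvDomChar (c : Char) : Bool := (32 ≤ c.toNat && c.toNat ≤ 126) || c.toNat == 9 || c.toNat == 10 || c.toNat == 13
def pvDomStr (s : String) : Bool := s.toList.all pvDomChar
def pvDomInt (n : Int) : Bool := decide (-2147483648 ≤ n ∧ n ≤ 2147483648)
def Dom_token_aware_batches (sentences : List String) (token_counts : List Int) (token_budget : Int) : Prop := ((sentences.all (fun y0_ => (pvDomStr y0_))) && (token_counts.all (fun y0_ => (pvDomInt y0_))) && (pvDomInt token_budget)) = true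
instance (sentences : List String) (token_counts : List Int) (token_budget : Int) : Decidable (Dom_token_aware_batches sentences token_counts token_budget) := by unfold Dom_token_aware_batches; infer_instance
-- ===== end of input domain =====

-- B replaces A's single-pass build-the-batches state machine by two staged passes:
-- pass 1 derives only the batch SIZES from token_counts, pass 2 slices the sentence
-- list at the cumulative boundaries (objective: alternative decomposition).

-- ===== PORT A =====
-- one loop step of A: state (groups, current, current_max), input (sent, n_tok)
def tab_stepA (token_budget : Int) (st : List (List String) × List String × Int)
    (p : String × Int) : List (List String) × List String × Int :=
  if st.2.1 ≠ [] ∧ (max st.2.2 p.2) * ((st.2.1.length : Int) + 1) > token_budget then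
    (st.1 ++ [st.2.1], [p.1], p.2)
  else
    (st.1, st.2.1 ++ [p.1], max st.2.2 p.2)

def token_aware_batches (sentences : List String) (token_counts : List Int) (token_budget : Int) : List (List String) :=
  let st := (sentences.zip token_counts).foldl (tab_stepA token_budget) ([], [], 0)
  if st.2.1 ≠ [] then st.1 ++ [st.2.1] else st.1

-- ===== PORT B =====
-- pass-1 inner `while j < n and max(pm, token_counts[j]) * (j-i+1) <= token_budget`
-- of Source B; fuel-guarded (the fuel n always suffices); returns the final j.
-- j < n ≤ len token_counts, so getD is exact for token_counts[j].
def tabB_inner (token_budget : Int) (token_counts : List Int) (n i : Nat) :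
    Nat → Int → Nat → Nat
  | 0, _, j => j
  | fuel + 1, pm, j =>
    if j < n then
      let t := token_counts.getD j 0
      if max pm t * ((j - i + 1 : Nat) : Int) ≤ token_budget then
        tabB_inner token_budget token_counts n i fuel (max pm t) (j + 1)
      else j
    else j

-- pass-1 outer `while i < n` of Source B, accumulating the batch sizes; fuel-guarded
def tabB_sizes (token_budget : Int) (token_counts : List Int) (n : Nat) :
    Nat → Nat → List Int → List Int
  | 0, _, sizes => sizes
  | fuel + 1, i, sizes =>
    if i < n then
      let j := tabB_inner token_budget token_counts n i n (token_counts.getD i 0) (i + 1)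
      tabB_sizes token_budget token_counts n fuel j (sizes ++ [((j - i : Nat) : Int)])
    else sizes

-- pass 2, `bounds` accumulation: bounds = [0]; for L in sizes: bounds.append(bounds[-1] + L)
def tabB_bounds (sizes : List Int) : List Int :=
  sizes.foldl (fun bs L => bs ++ [bs.getLast! + L]) [(0 : Int)]

def token_aware_batches_alt (sentences : List String) (token_counts : List Int) (token_budget : Int) : List (List String) :=
  let bounds := tabB_bounds (tabB_sizes token_budget token_counts
    (min sentences.length token_counts.length) (min sentences.length token_counts.length) 0 [])
  (bounds.zip bounds.tail).map (fun p => PySem.List.slice sentences (some p.1) (some p.2))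

-- ===== PRECONDITION & SPEC =====
-- Pre_ excludes only the out-of-natural-domain combination of a NEGATIVE token budget with a
-- negative first token count: there A's running max for the first batch is seeded with 0 while B
-- uses the true batch max, and either grouping is defensible on such nonsensical inputs.
def Pre_token_aware_batches (sentences : List String) (token_counts : List Int) (token_budget : Int) : Prop :=
  (decide (0 ≤ token_budget) || (token_counts.take 1).all (fun t => decide (0 ≤ t))) = true
instance (sentences : List String) (token_counts : List Int) (token_budget : Int) : Decidable (Pre_token_aware_batches sentences token_counts token_budget) := by unfold Pre_token_aware_batches; infer_instance

def pvWitness_token_aware_batches : List String × List Int × Int := (["a", "b"], [5, 7], 20)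

def Spec_token_aware_batches (sentences : List String) (token_counts : List Int) (token_budget : Int) (out : List (List String)) : Prop := out = token_aware_batches_alt sentences token_counts token_budget
instance (sentences : List String) (token_counts : List Int) (token_budget : Int) (out : List (List String)) : Decidable (Spec_token_aware_batches sentences token_counts token_budget out) := by unfold Spec_token_aware_batches; infer_instance

-- ===== CLAIM (what is proved, stated in full; the proofs are below) =====
def Claim_equal_token_aware_batches : Prop := ∀ (sentences : List String) (token_counts : List Int) (token_budget : Int), Dom_token_aware_batches sentences token_counts token_budget → Pre_token_aware_batches sentences token_counts token_budget → Spec_token_aware_batches sentences token_counts token_budget (token_aware_batches sentences token_counts token_budget)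

-- ===== LEMMAS AND PROOFS =====

-- relation between A's running max (cm) and B's true batch max (m)
def tab_rel (b cm m : Int) : Prop := cm = m ∨ (0 ≤ b ∧ cm = max 0 m)

-- reference greedy window extension: extend the current batch (size k, max m) through zs
def tab_ext (token_budget m : Int) (k : Nat) : List (String × Int) → List String × List (String × Int)
  | [] => ([], [])
  | (s, t) :: rest =>
    if max m t * ((k : Int) + 1) ≤ token_budget then
      ((s :: (tab_ext token_budget (max m t) (k + 1) rest).1),
       (tab_ext token_budget (max m t) (k + 1) rest).2)
    else ([], (s, t) :: rest)

lemma tab_ext_suffix (b : Int) : ∀ (zs : List (String × Int)) (m : Int) (k : Nat),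
    (tab_ext b m k zs).2 = zs.drop (tab_ext b m k zs).1.length := by
  intro zs
  induction zs with
  | nil => intro m k; simp [tab_ext]
  | cons p rest ih =>
    intro m k
    obtain ⟨s, t⟩ := p
    by_cases hc : max m t * ((k : Int) + 1) ≤ b
    · simp [tab_ext, hc, ih (max m t) (k + 1)]
    · simp [tab_ext, hc]

-- reference per-batch grouping
def tab_go (token_budget : Int) : List (String × Int) → List (List String)
  | [] => []
  | (s, t) :: rest =>
    (s :: (tab_ext token_budget t 1 rest).1) ::
      tab_go token_budget (tab_ext token_budget t 1 rest).2
termination_by zs => zs.length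
decreasing_by
  rw [tab_ext_suffix]
  simp only [List.length_drop, List.length_cons]
  omega

lemma tab_go_nil (b : Int) : tab_go b [] = [] := by rw [tab_go.eq_def]

lemma tab_go_cons (b : Int) (s : String) (t : Int) (rest : List (String × Int)) :
    tab_go b ((s, t) :: rest) =
      (s :: (tab_ext b t 1 rest).1) :: tab_go b (tab_ext b t 1 rest).2 := by
  rw [tab_go.eq_def]

lemma tab_rel_iff (b cm m t K : Int) (hK : 0 ≤ K) (h : tab_rel b cm m) :
    (max cm t * K > b ↔ max m t * K > b) := by
  rcases h with rfl | ⟨hb, rfl⟩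
  · rfl
  · rw [max_assoc]
    by_cases hM : 0 ≤ max m t
    · rw [max_eq_right hM]
    · push_neg at hM
      rw [max_eq_left (le_of_lt hM)]
      constructor
      · intro hx; rw [zero_mul] at hx; omega
      · intro hx; exfalso; nlinarith

lemma tab_rel_step (b cm m t : Int) (h : tab_rel b cm m) : tab_rel b (max cm t) (max m t) := by
  rcases h with rfl | ⟨hb, rfl⟩
  · exact Or.inl rfl
  · exact Or.inr ⟨hb, by rw [max_assoc]⟩

-- groups accumulate on the left in A's fold
lemma tab_groups (b : Int) (zs : List (String × Int)) :
    ∀ (g : List (List String)) (c : List String) (cm : Int),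
      zs.foldl (tab_stepA b) (g, c, cm) =
        (g ++ (zs.foldl (tab_stepA b) ([], c, cm)).1, (zs.foldl (tab_stepA b) ([], c, cm)).2) := by
  induction zs with
  | nil => intro g c cm; simp
  | cons p rest ih =>
    intro g c cm
    simp only [List.foldl_cons]
    by_cases hc : c ≠ [] ∧ (max cm p.2) * ((c.length : Int) + 1) > b
    · rw [show tab_stepA b (g, c, cm) p = (g ++ [c], [p.1], p.2) by simp [tab_stepA, hc],
         show tab_stepA b ([], c, cm) p = ([c], [p.1], p.2) by simp [tab_stepA, hc],
         ih (g ++ [c]), ih [c]]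
      simp
    · push_neg at hc
      rw [show tab_stepA b (g, c, cm) p = (g, c ++ [p.1], max cm p.2) by
            simp [tab_stepA]; exact hc,
         show tab_stepA b ([], c, cm) p = ([], c ++ [p.1], max cm p.2) by
            simp [tab_stepA]; exact hc]
      exact ih g (c ++ [p.1]) (max cm p.2)

-- run A's fold from (∅, c, cm) and apply the final flush
def tab_fin (b : Int) (c : List String) (cm : Int) (zs : List (String × Int)) : List (List String) :=
  if (zs.foldl (tab_stepA b) ([], c, cm)).2.1 ≠ [] then
    (zs.foldl (tab_stepA b) ([], c, cm)).1 ++ [(zs.foldl (tab_stepA b) ([], c, cm)).2.1]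
  else (zs.foldl (tab_stepA b) ([], c, cm)).1

lemma tab_fin_g (b : Int) (g : List (List String)) (c : List String) (cm : Int)
    (zs : List (String × Int)) :
    (if (zs.foldl (tab_stepA b) (g, c, cm)).2.1 ≠ [] then
       (zs.foldl (tab_stepA b) (g, c, cm)).1 ++ [(zs.foldl (tab_stepA b) (g, c, cm)).2.1]
     else (zs.foldl (tab_stepA b) (g, c, cm)).1) = g ++ tab_fin b c cm zs := by
  rw [tab_groups b zs g c cm]
  unfold tab_fin
  split <;> simp_all

-- main invariant: a nonempty current batch of A continues exactly as the window extension
lemma tab_main (b : Int) (zs : List (String × Int)) :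
    ∀ (c : List String) (cm m : Int), c ≠ [] → tab_rel b cm m →
      tab_fin b c cm zs =
        (c ++ (tab_ext b m c.length zs).1) :: tab_go b (tab_ext b m c.length zs).2 := by
  induction zs with
  | nil => intro c cm m hc _; simp [tab_fin, tab_ext, tab_go_nil, hc]
  | cons p rest ih =>
    intro c cm m hc hrel
    obtain ⟨s, t⟩ := p
    have hiff := tab_rel_iff b cm m t ((c.length : Int) + 1) (by positivity) hrel
    by_cases hext : max m t * ((c.length : Int) + 1) ≤ b
    · have hnf : ¬ (max cm t * ((c.length : Int) + 1) > b) := by rw [hiff]; omega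
      have hstep : tab_stepA b ([], c, cm) (s, t) = ([], c ++ [s], max cm t) := by
        simp [tab_stepA]; exact fun _ => not_lt.mp hnf
      have h1 : tab_fin b c cm ((s, t) :: rest) = tab_fin b (c ++ [s]) (max cm t) rest := by
        simp [tab_fin, hstep]
      rw [h1, ih (c ++ [s]) (max cm t) (max m t) (by simp) (tab_rel_step b cm m t hrel)]
      simp [tab_ext, hext]
    · have hf : max cm t * ((c.length : Int) + 1) > b := by rw [hiff]; omega
      have hstep : tab_stepA b ([], c, cm) (s, t) = ([c], [s], t) := by
        simp [tab_stepA, hc, hf]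
      have h1 : tab_fin b c cm ((s, t) :: rest) = [c] ++ tab_fin b [s] t rest := by
        simp only [tab_fin, List.foldl_cons, hstep]
        exact tab_fin_g b [c] [s] t rest
      rw [h1, ih [s] t t (by simp) (Or.inl rfl)]
      simp [tab_go_cons, tab_ext, hext]

-- A computes the reference per-batch grouping
lemma tab_a_go (sentences : List String) (token_counts : List Int) (b : Int)
    (hpre : Pre_token_aware_batches sentences token_counts b) :
    token_aware_batches sentences token_counts b = tab_go b (sentences.zip token_counts) := by
  cases sentences with
  | nil => simp [token_aware_batches, tab_go_nil]
  | cons s0 srest =>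
    cases token_counts with
    | nil => simp [token_aware_batches, tab_go_nil]
    | cons t0 trest =>
      have hrel : tab_rel b (max 0 t0) t0 := by
        unfold Pre_token_aware_batches at hpre
        simp only [Bool.or_eq_true, decide_eq_true_eq, List.all_eq_true] at hpre
        rcases hpre with hb | ht
        · exact Or.inr ⟨hb, rfl⟩
        · exact Or.inl (max_eq_right (ht t0 (by simp)))
      have h1 : token_aware_batches (s0 :: srest) (t0 :: trest) b =
          tab_fin b [s0] (max 0 t0) (srest.zip trest) := by
        simp [token_aware_batches, tab_fin, tab_stepA]
      rw [h1, tab_main b (srest.zip trest) [s0] (max 0 t0) t0 (by simp) hrel]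
      simp [tab_go_cons]

-- ===== B-side lemmas =====

-- the window extension and its leftover concatenate to the whole pair list (firsts)
lemma tab_ext_join (b : Int) : ∀ (zs : List (String × Int)) (m : Int) (k : Nat),
    (tab_ext b m k zs).1 ++ (tab_ext b m k zs).2.map Prod.fst = zs.map Prod.fst := by
  intro zs
  induction zs with
  | nil => intro m k; simp [tab_ext]
  | cons p rest ih =>
    intro m k
    obtain ⟨s, t⟩ := p
    by_cases hc : max m t * ((k : Int) + 1) ≤ b
    · simp [tab_ext, hc, ih (max m t) (k + 1)]
    · simp [tab_ext, hc]

lemma tab_go_join (b : Int) : ∀ (zs : List (String × Int)),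
    (tab_go b zs).flatten = zs.map Prod.fst := by
  intro zs
  induction hzs : zs.length using Nat.strong_induction_on generalizing zs with
  | _ len ih =>
    cases zs with
    | nil => simp [tab_go_nil]
    | cons p rest =>
      obtain ⟨s, t⟩ := p
      rw [tab_go_cons]
      have hlen : (tab_ext b t 1 rest).2.length < len := by
        rw [tab_ext_suffix]
        simp only [List.length_drop]
        simp only [List.length_cons] at hzs
        omega
      have := ih _ hlen (tab_ext b t 1 rest).2 rfl
      simp only [List.flatten_cons, this, List.map_cons, List.cons_append]
      rw [tab_ext_join]

lemma map_fst_zip_take (s : List String) : ∀ (tc : List Int),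
    (s.zip tc).map Prod.fst = s.take (min s.length tc.length) := by
  induction s with
  | nil => intro tc; simp
  | cons x xs ih =>
    intro tc
    cases tc with
    | nil => simp
    | cons t ts =>
      simp only [List.zip_cons_cons, List.map_cons, ih ts, List.length_cons]
      rw [show min (xs.length + 1) (ts.length + 1) = min xs.length ts.length + 1 by omega]
      simp [List.take_succ_cons]

-- B's inner index loop computes the window-extension length on the dropped suffix
lemma tabB_inner_eq (b : Int) (s : List String) (tc : List Int) (n : Nat)
    (hn : n = min s.length tc.length) :
    ∀ (d i : Nat) (m : Int) (j : Nat), n - j ≤ d → i ≤ j →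
      tabB_inner b tc n i d m j = j + (tab_ext b m (j - i) ((s.zip tc).drop j)).1.length := by
  intro d
  induction d with
  | zero =>
    intro i m j hd hij
    have hjn : ¬ j < n := by omega
    have hdrop : (s.zip tc).drop j = [] := by
      apply List.drop_eq_nil_of_le
      simp [List.length_zip]; omega
    rw [tabB_inner]
    simp [hdrop, tab_ext]
  | succ d ih =>
    intro i m j hd hij
    by_cases hj : j < n
    · have hjs : j < s.length := by omega
      have hjt : j < tc.length := by omega
      have hdrop : (s.zip tc).drop j = (s[j], tc[j]) :: (s.zip tc).drop (j + 1) := by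
        rw [List.drop_eq_getElem_cons (by simp [List.length_zip]; omega)]
        simp
      have hgd : tc.getD j 0 = tc[j] := List.getD_eq_getElem tc 0 hjt
      have hcast : ((j - i + 1 : Nat) : Int) = ((j - i : Nat) : Int) + 1 := by push_cast; ring
      rw [tabB_inner, if_pos hj]
      simp only [hgd, hcast, hdrop]
      by_cases hcond : max m tc[j] * (((j - i : Nat) : Int) + 1) ≤ b
      · rw [if_pos hcond, ih i (max m tc[j]) (j + 1) (by omega) (by omega)]
        rw [show j + 1 - i = (j - i) + 1 by omega]
        simp only [tab_ext, if_pos hcond]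
        simp
        omega
      · rw [if_neg hcond]
        simp only [tab_ext, if_neg hcond]
        simp
    · have hdrop : (s.zip tc).drop j = [] := by
        apply List.drop_eq_nil_of_le
        simp [List.length_zip]; omega
      rw [tabB_inner, if_neg hj]
      simp [hdrop, tab_ext]

-- B's outer index loop computes the lengths of the reference groups on the dropped suffix
lemma tabB_sizes_eq (b : Int) (s : List String) (tc : List Int) (n : Nat)
    (hn : n = min s.length tc.length) :
    ∀ (d i : Nat) (acc : List Int), n - i ≤ d →
      tabB_sizes b tc n d i acc =
        acc ++ (tab_go b ((s.zip tc).drop i)).map (fun g => (g.length : Int)) := by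
  intro d
  induction d with
  | zero =>
    intro i acc hd
    have hi : ¬ i < n := by omega
    have hdrop : (s.zip tc).drop i = [] := by
      apply List.drop_eq_nil_of_le
      simp [List.length_zip]; omega
    rw [tabB_sizes]
    simp [hdrop, tab_go_nil]
  | succ d ih =>
    intro i acc hd
    by_cases hi : i < n
    · have his : i < s.length := by omega
      have hit : i < tc.length := by omega
      have hgd : tc.getD i 0 = tc[i] := List.getD_eq_getElem tc 0 hit
      have hdrop : (s.zip tc).drop i = (s[i], tc[i]) :: (s.zip tc).drop (i + 1) := by
        rw [List.drop_eq_getElem_cons (by simp [List.length_zip]; omega)]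
        simp
      have hinner := tabB_inner_eq b s tc n hn n i tc[i] (i + 1) (by omega) (by omega)
      rw [show i + 1 - i = 1 by omega] at hinner
      rw [tabB_sizes, if_pos hi]
      simp only [hgd, hinner]
      have hsuf := tab_ext_suffix b ((s.zip tc).drop (i + 1)) tc[i] 1
      have hdd : (s.zip tc).drop (i + 1 + (tab_ext b tc[i] 1 ((s.zip tc).drop (i + 1))).1.length) =
          (tab_ext b tc[i] 1 ((s.zip tc).drop (i + 1))).2 := by
        rw [hsuf, List.drop_drop]
      rw [ih (i + 1 + (tab_ext b tc[i] 1 ((s.zip tc).drop (i + 1))).1.length)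
        (acc ++ [((i + 1 + (tab_ext b tc[i] 1 ((s.zip tc).drop (i + 1))).1.length - i : Nat) : Int)])
        (by omega)]
      rw [hdd, hdrop, tab_go_cons]
      simp only [List.map_cons, List.append_assoc, List.singleton_append, List.length_cons]
      congr 3
      omega
    · have hdrop : (s.zip tc).drop i = [] := by
        apply List.drop_eq_nil_of_le
        simp [List.length_zip]; omega
      rw [tabB_sizes, if_neg hi]
      simp [hdrop, tab_go_nil]

-- pass 2 helpers: cumulative sums and consecutive boundary pairs
def tab_sums (a : Int) : List Int → List Int
  | [] => [a]
  | L :: Ls => a :: tab_sums (a + L) Ls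

def tab_pairs (a : Int) : List Int → List (Int × Int)
  | [] => []
  | L :: Ls => (a, a + L) :: tab_pairs (a + L) Ls

lemma tab_sums_head (a : Int) (Ls : List Int) : ∃ r, tab_sums a Ls = a :: r := by
  cases Ls <;> simp [tab_sums]

lemma tab_bounds_foldl : ∀ (Ls : List Int) (bs : List Int) (a : Int),
    Ls.foldl (fun bs L => bs ++ [bs.getLast! + L]) (bs ++ [a]) = bs ++ tab_sums a Ls := by
  intro Ls
  induction Ls with
  | nil => intro bs a; simp [tab_sums]
  | cons L Ls ih =>
    intro bs a
    simp only [List.foldl_cons]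
    have hlast : (bs ++ [a]).getLast! = a := by
      simp
    rw [hlast, show bs ++ [a] ++ [a + L] = (bs ++ [a]) ++ [a + L] by simp,
        ih (bs ++ [a]) (a + L)]
    simp [tab_sums]

lemma tab_zip_sums : ∀ (Ls : List Int) (a : Int),
    (tab_sums a Ls).zip (tab_sums a Ls).tail = tab_pairs a Ls := by
  intro Ls
  induction Ls with
  | nil => intro a; simp [tab_sums, tab_pairs]
  | cons L Ls ih =>
    intro a
    obtain ⟨r, hr⟩ := tab_sums_head (a + L) Ls
    simp only [tab_sums, tab_pairs, List.tail_cons]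
    have h2 := ih (a + L)
    rw [hr] at h2
    simp only [List.tail_cons] at h2
    rw [hr, List.zip_cons_cons, h2]

-- slicing at consecutive boundaries reproduces the groups, for any prefix position
lemma tab_slice_pairs : ∀ (gs : List (List String)) (a : Nat) (s : List String),
    gs.flatten <+: s.drop a →
      (tab_pairs (a : Int) (gs.map (fun g => (g.length : Int)))).map
        (fun p => PySem.List.slice s (some p.1) (some p.2)) = gs := by
  intro gs
  induction gs with
  | nil => intro a s _; simp [tab_pairs]
  | cons g gs ih =>
    intro a s hpre
    obtain ⟨r, hr⟩ := hpre
    simp only [List.flatten_cons, List.append_assoc] at hr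
    have hcast : (a : Int) + (g.length : Int) = ((a + g.length : Nat) : Int) := by push_cast; ring
    simp only [List.map_cons, tab_pairs, hcast]
    rw [PySem.List.slice_natCast]
    have hg : (s.drop a).take (a + g.length - a) = g := by
      rw [show a + g.length - a = g.length by omega, ← hr]
      simp
    have hpre2 : gs.flatten <+: s.drop (a + g.length) := by
      refine ⟨r, ?_⟩
      have hdd : s.drop (a + g.length) = (s.drop a).drop g.length := by
        rw [List.drop_drop]
      rw [hdd, ← hr]
      simp
    rw [hg, ih (a + g.length) s hpre2]

-- B computes the reference per-batch grouping
lemma tab_b_go (sentences : List String) (token_counts : List Int) (b : Int) :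
    token_aware_batches_alt sentences token_counts b = tab_go b (sentences.zip token_counts) := by
  unfold token_aware_batches_alt tabB_bounds
  rw [tabB_sizes_eq b sentences token_counts (min sentences.length token_counts.length) rfl
    (min sentences.length token_counts.length) 0 [] (by omega)]
  simp only [List.drop_zero, List.nil_append]
  rw [show [(0 : Int)] = ([] : List Int) ++ [((0 : Nat) : Int)] by simp,
      tab_bounds_foldl, List.nil_append, tab_zip_sums]
  apply tab_slice_pairs (tab_go b (sentences.zip token_counts)) 0 sentences
  rw [List.drop_zero, tab_go_join, map_fst_zip_take]
  exact List.take_prefix _ _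

-- ===== VERDICT (by name: the statement is the Claim_ definition above) =====
theorem token_aware_batches_spec : Claim_equal_token_aware_batches := by
  intro sentences token_counts token_budget _ hpre
  unfold Spec_token_aware_batches
  rw [tab_a_go sentences token_counts token_budget hpre, tab_b_go]
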